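-- pv_equiv track=rewrite | github.com/stefanofranzini/RL_snake | pysnake.py | update_gobble
-- ===== SOURCE A (Python) =====
-- def update_gobble(indexes):
--
--     i = 0
--
--     while i < len(indexes):
--         indexes[i] -= 1
--         if indexes[i] < 0:
--             del indexes[i]
--         else:
--             i += 1
--
--     return indexes
-- ===== SOURCE B (Python) =====
-- def update_gobble(indexes):
--     # Two-pointer in-place compaction: one forward pass with a write index,
--     # no element re-shifting on deletion (same in-place contract as A).
--     j = 0
--     for i in range(len(indexes)):
--         if indexes[i] > 0:
--             indexes[j] = indexes[i] - 1
--             j += 1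
--     del indexes[j:]
--     return indexes
-- ===== Notes on version B (the rewrite author's own statement) =====
-- stated objective: faster
-- what changed: Replaces A's decrement-then-del-at-index loop (each deletion shifts the tail) with a single forward pass using a write pointer that compacts surviving decremented elements in place and truncates the tail once.
import Mathlib
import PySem

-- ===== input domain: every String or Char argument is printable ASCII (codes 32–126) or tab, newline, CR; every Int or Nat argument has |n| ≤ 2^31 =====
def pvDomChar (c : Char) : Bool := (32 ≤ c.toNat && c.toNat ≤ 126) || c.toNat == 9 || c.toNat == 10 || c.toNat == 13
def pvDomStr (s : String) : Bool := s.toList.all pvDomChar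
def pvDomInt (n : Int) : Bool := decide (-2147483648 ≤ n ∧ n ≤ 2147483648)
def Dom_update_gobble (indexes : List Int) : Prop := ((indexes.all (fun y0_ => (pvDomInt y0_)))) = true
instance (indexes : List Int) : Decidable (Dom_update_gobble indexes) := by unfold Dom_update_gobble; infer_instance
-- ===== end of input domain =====

-- B replaces A's decrement-then-del-at-index loop with a single write-pointer compaction pass (objective: faster).
-- Both Pythons mutate `indexes` in place and return the same object; the equivalence proved here is about the return value.


-- ===== PORT A =====
-- A's while loop: at position i it decrements; if the result is negative it deletes
-- (the next element slides to index i), else advances i. This is exactly head-recursion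
-- over the remaining suffix.
def update_gobble (indexes : List Int) : List Int :=
  match indexes with
  | [] => []
  | h :: t =>
    if h - 1 < 0 then update_gobble t
    else (h - 1) :: update_gobble t

-- ===== PORT B =====
-- Source B: write pointer j; the accumulator is the written prefix indexes[:j]; the final
-- 'del indexes[j:]' means the result is exactly that prefix.
def update_gobble_alt (indexes : List Int) : List Int :=
  indexes.foldl (fun acc x => if x > 0 then acc ++ [x - 1] else acc) []

-- ===== PRECONDITION & SPEC =====
def Spec_update_gobble (indexes : List Int) (out : List Int) : Prop := out = update_gobble_alt indexes
instance (indexes : List Int) (out : List Int) : Decidable (Spec_update_gobble indexes out) := by unfold Spec_update_gobble; infer_instance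

-- ===== CLAIM (what is proved, stated in full; the proofs are below) =====
def Claim_equal_update_gobble : Prop := ∀ (indexes : List Int), Dom_update_gobble indexes → Spec_update_gobble indexes (update_gobble indexes)

-- ===== LEMMAS AND PROOFS =====
theorem update_gobble_foldl (l : List Int) (acc : List Int) :
    l.foldl (fun acc x => if x > 0 then acc ++ [x - 1] else acc) acc
      = acc ++ update_gobble l := by
  induction l generalizing acc with
  | nil => simp [update_gobble]
  | cons h t ih =>
    simp only [List.foldl, update_gobble]
    by_cases hp : h > 0
    · rw [if_pos hp, if_neg (by omega), ih]; simp
    · rw [if_neg hp, if_pos (by omega), ih]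

-- ===== VERDICT (by name: the statement is the Claim_ definition above) =====
theorem update_gobble_spec : Claim_equal_update_gobble := by
  intro indexes _
  unfold Spec_update_gobble update_gobble_alt
  rw [update_gobble_foldl]
  simp
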